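-- pv_equiv track=rewrite | github.com/kashifmalik962/Astrology_Chatbot | main.py | calculate_mahadasha_differences
-- ===== SOURCE A (Python) =====
-- def calculate_mahadasha_differences(mahadasha, mahadasha_order, start_year):
--     filter_mahadasha = []
--     previous_date = str(start_year)  # Start year as the initial date
--
--     for i in range(len(mahadasha)):
--         # Current mahadasha and end date
--         end_date = mahadasha_order[i] if i < len(mahadasha_order) else None
--         filter_mahadasha.append(f"{mahadasha[i]} {previous_date} to {end_date}")
--         previous_date = end_date  # Update the previous date to the current end date
--
--     return filter_mahadasha
-- ===== SOURCE B (Python) =====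
-- def calculate_mahadasha_differences(mahadasha, mahadasha_order, start_year):
--     # Stateless per-index formulation: the left boundary of entry i is a closed
--     # form of i alone (no threaded previous_date), so the list can be built in
--     # any order; we build it back-to-front and reverse once at the end.
--     def left(i):
--         if i == 0:
--             return str(start_year)
--         return mahadasha_order[i - 1] if i - 1 < len(mahadasha_order) else None
--
--     def right(i):
--         return mahadasha_order[i] if i < len(mahadasha_order) else None
--
--     out = []
--     for i in range(len(mahadasha) - 1, -1, -1):
--         out.append(f"{mahadasha[i]} {left(i)} to {right(i)}")
--     out.reverse()
--     return out
-- ===== Notes on version B (the rewrite author's own statement) =====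
-- stated objective: alternative
-- what changed: Eliminates the threaded previous_date state: each entry's left boundary is recomputed from its index alone by a closed-form rule (str(start_year) at 0, else mahadasha_order[i-1] with None fallback), which lets B build the list back-to-front and reverse it, instead of A's forward accumulator loop.
import Mathlib
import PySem

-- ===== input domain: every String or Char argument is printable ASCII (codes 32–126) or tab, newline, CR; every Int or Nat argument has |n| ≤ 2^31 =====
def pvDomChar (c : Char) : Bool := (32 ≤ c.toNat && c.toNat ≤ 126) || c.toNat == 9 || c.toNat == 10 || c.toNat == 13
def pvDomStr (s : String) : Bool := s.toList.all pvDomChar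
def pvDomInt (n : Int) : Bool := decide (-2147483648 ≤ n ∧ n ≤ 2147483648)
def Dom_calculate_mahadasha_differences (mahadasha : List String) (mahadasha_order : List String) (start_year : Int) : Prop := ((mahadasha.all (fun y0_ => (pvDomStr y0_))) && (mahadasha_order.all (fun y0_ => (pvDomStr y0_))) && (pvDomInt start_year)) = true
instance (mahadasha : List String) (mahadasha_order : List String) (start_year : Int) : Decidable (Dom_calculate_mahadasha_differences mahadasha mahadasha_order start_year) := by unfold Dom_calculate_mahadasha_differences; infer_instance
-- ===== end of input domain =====

-- B drops A's threaded previous_date: each entry's left boundary is a closed form of its index, so B builds the list back-to-front and reverses it (alternative decomposition, same cost).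

-- ===== PORT A =====
-- f"{x}" where x is a string or None: None prints as "None".
def pvFmtOpt : Option String → String
  | none => "None"
  | some s => s

-- the loop 'for i in range(len(mahadasha))': structural recursion on mahadasha carrying
-- the index i and previous_date; 'mahadasha_order[i] if i < len(mahadasha_order) else None'
-- is exactly mahadasha_order[i]? for a nonnegative index.
def pvALoop (order : List String) : List String → Nat → Option String → List String
  | [], _, _ => []
  | x :: rest, i, prev =>
      let end_date := order[i]?
      (x ++ " " ++ pvFmtOpt prev ++ " to " ++ pvFmtOpt end_date) :: pvALoop order rest (i + 1) end_date

def calculate_mahadasha_differences (mahadasha : List String) (mahadasha_order : List String) (start_year : Int) : List String :=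
  pvALoop mahadasha_order mahadasha 0 (some (PySem.Int.toStr start_year))

-- ===== PORT B =====
-- left(i): str(start_year) at index 0, else mahadasha_order[i-1] with None fallback.
def pvLeft (order : List String) (start_year : Int) (i : Nat) : Option String :=
  if i = 0 then some (PySem.Int.toStr start_year) else order[i - 1]?

-- right(i): mahadasha_order[i] if in range else None.
def pvRight (order : List String) (i : Nat) : Option String := order[i]?

-- the f-string of entry i (mahadasha[i] is always in range when used).
def pvEntry (m order : List String) (start_year : Int) (i : Nat) : String :=
  (m[i]?.getD "") ++ " " ++ pvFmtOpt (pvLeft order start_year i) ++ " to " ++ pvFmtOpt (pvRight order i)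

-- 'for i in range(n-1, -1, -1): out.append(entry(i))': recursion on the count k,
-- appending entry (k-1) each step, exactly the Python loop's append order.
def pvBLoop (m order : List String) (start_year : Int) : Nat → List String → List String
  | 0, out => out
  | k + 1, out => pvBLoop m order start_year k (out ++ [pvEntry m order start_year k])

def calculate_mahadasha_differences_alt (mahadasha : List String) (mahadasha_order : List String) (start_year : Int) : List String :=
  (pvBLoop mahadasha mahadasha_order start_year mahadasha.length []).reverse

-- ===== PRECONDITION & SPEC =====
def Spec_calculate_mahadasha_differences (mahadasha : List String) (mahadasha_order : List String) (start_year : Int) (out : List String) : Prop := out = calculate_mahadasha_differences_alt mahadasha mahadasha_order start_year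
instance (mahadasha : List String) (mahadasha_order : List String) (start_year : Int) (out : List String) : Decidable (Spec_calculate_mahadasha_differences mahadasha mahadasha_order start_year out) := by unfold Spec_calculate_mahadasha_differences; infer_instance

-- ===== CLAIM =====
def Claim_equal_calculate_mahadasha_differences : Prop := ∀ (mahadasha : List String) (mahadasha_order : List String) (start_year : Int), Dom_calculate_mahadasha_differences mahadasha mahadasha_order start_year → Spec_calculate_mahadasha_differences mahadasha mahadasha_order start_year (calculate_mahadasha_differences mahadasha mahadasha_order start_year)

-- ===== LEMMAS AND PROOFS =====

-- A's loop produces entry i at position i: characterisation as a map over the index range.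
lemma pvALoop_eq_map (m order : List String) (sy : Int) :
    ∀ (k i : Nat) (prev : Option String), m.length = i + k → prev = pvLeft order sy i →
      pvALoop order (m.drop i) i prev = (List.range k).map (fun j => pvEntry m order sy (i + j)) := by
  intro k
  induction k with
  | zero =>
      intro i prev hlen _
      have : m.drop i = [] := List.drop_eq_nil_of_le (by omega)
      simp [this, pvALoop]
  | succ k ih =>
      intro i prev hlen hprev
      have hi : i < m.length := by omega
      rw [List.drop_eq_getElem_cons hi, List.range_succ_eq_map]
      simp only [pvALoop, List.map_cons, List.map_map, Function.comp]
      refine congrArg₂ _ ?_ ?_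
      · simp [hprev, pvEntry, pvRight, List.getElem?_eq_getElem hi]
      · have hnext : order[i]? = pvLeft order sy (i + 1) := by simp [pvLeft]
        rw [hnext, ih (i + 1) _ (by omega) rfl]
        apply List.map_congr_left
        intro j _
        congr 1
        omega

-- B's loop appends entries n-1, n-2, …, 0; reversing yields the forward map.
lemma pvBLoop_spec (m order : List String) (sy : Int) :
    ∀ (k : Nat) (out : List String),
      pvBLoop m order sy k out = out ++ ((List.range k).map (pvEntry m order sy)).reverse := by
  intro k
  induction k with
  | zero => intro out; simp [pvBLoop]
  | succ k ih =>
      intro out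
      simp [pvBLoop, ih, List.range_succ]

-- ===== VERDICT =====
theorem calculate_mahadasha_differences_spec : Claim_equal_calculate_mahadasha_differences := by
  intro m order sy _
  unfold Spec_calculate_mahadasha_differences calculate_mahadasha_differences calculate_mahadasha_differences_alt
  rw [pvBLoop_spec]
  have := pvALoop_eq_map m order sy m.length 0 (some (PySem.Int.toStr sy)) (by omega) (by simp [pvLeft])
  simpa using this
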